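-- pv_equiv track=rewrite | github.com/brianlockwood43/epoxy-bot | tests/test_summary_upsert_partitioning.py | _parse_recall_scope
-- ===== SOURCE A (Python) =====
-- def _parse_recall_scope(scope: str | None) -> tuple[str, int | None, int | None]:
--     text = (scope or "auto").strip().lower()
--     temporal = "auto"
--     guild_id: int | None = None
--     channel_id: int | None = None
--     for tok in text.split():
--         if tok in {"hot", "warm", "cold", "auto"}:
--             temporal = tok
--         elif tok.startswith("channel:"):
--             try:
--                 channel_id = int(tok.split(":", 1)[1])
--             except Exception:
--                 channel_id = None
--         elif tok.startswith("guild:"):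
--             try:
--                 guild_id = int(tok.split(":", 1)[1])
--             except Exception:
--                 guild_id = None
--     return temporal, guild_id, channel_id
-- ===== SOURCE B (Python) =====
-- def _parse_recall_scope(scope):
--     tokens = (scope or "auto").strip().lower().split()
--     temporal = next((t for t in reversed(tokens) if t in {"hot", "warm", "cold", "auto"}), "auto")
--
--     def last_id(prefix):
--         for t in reversed(tokens):
--             if t.startswith(prefix):
--                 try:
--                     return int(t.split(":", 1)[1])
--                 except Exception:
--                     return None
--         return None
--
--     return temporal, last_id("guild:"), last_id("channel:")
-- ===== Notes on version B (the rewrite author's own statement) =====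
-- stated objective: alternative
-- what changed: Replaces the single stateful branch loop with three independent last-occurrence scans over the reversed token list (one per field), each with its own early exit.
import Mathlib
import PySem

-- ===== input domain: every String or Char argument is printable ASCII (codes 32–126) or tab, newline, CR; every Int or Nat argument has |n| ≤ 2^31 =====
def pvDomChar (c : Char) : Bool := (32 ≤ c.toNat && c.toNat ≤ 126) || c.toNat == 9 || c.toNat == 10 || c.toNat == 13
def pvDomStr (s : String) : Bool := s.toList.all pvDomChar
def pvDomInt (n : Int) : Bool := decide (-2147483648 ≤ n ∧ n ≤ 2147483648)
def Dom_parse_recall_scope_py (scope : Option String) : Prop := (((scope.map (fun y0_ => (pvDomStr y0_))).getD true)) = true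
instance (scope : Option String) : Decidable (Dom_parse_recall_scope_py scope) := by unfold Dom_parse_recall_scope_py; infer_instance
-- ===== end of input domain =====

-- B replaces A's single stateful branch loop by three independent last-occurrence scans (alternative decomposition, same cost).

-- ===== PORT A =====
-- int(tok.split(":", 1)[1]) with the surrounding try/except: None exactly where Python raises
def pvAParseId (tok : List Char) : Option Int :=
  match PySem.List.pyGet? (PySem.Chars.splitOnMax tok [':'] 1) 1 with
  | some piece => PySem.Int.ofChars? piece
  | none => none

-- one iteration of A's for-loop over (temporal, guild_id, channel_id)
def pvAStep (st : List Char × Option Int × Option Int) (tok : List Char) :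
    List Char × Option Int × Option Int :=
  if (["hot".toList, "warm".toList, "cold".toList, "auto".toList]).contains tok then
    (tok, st.2.1, st.2.2)
  else if PySem.Chars.startswith tok "channel:".toList then (st.1, st.2.1, pvAParseId tok)
  else if PySem.Chars.startswith tok "guild:".toList then (st.1, pvAParseId tok, st.2.2)
  else st

def parse_recall_scope_py (scope : Option String) : String × Option Int × Option Int :=
  -- (scope or "auto"): None and "" are falsy
  let base : List Char :=
    match scope with
    | none => "auto".toList
    | some s => if s.toList = [] then "auto".toList else s.toList
  let text := PySem.Chars.lower (PySem.Chars.strip base)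
  let r := (PySem.Chars.split₀ text).foldl pvAStep ("auto".toList, none, none)
  (String.ofList r.1, r.2.1, r.2.2)

-- ===== PORT B =====
-- int(t.split(":", 1)[1]) with the surrounding try/except: None exactly where Python raises
def pvBParseId (t : List Char) : Option Int :=
  match PySem.List.pyGet? (PySem.Chars.splitOnMax t [':'] 1) 1 with
  | some piece => PySem.Int.ofChars? piece
  | none => none

-- next((t for t in reversed(tokens) if t in {...}), "auto")
def pvBLastTemporal (tokens : List (List Char)) : List Char :=
  (tokens.reverse.find? (fun t =>
    (["hot".toList, "warm".toList, "cold".toList, "auto".toList]).contains t)).getD "auto".toList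

-- last_id(prefix): first token of reversed(tokens) starting with prefix, parsed; None if absent
def pvBLastId (tokens : List (List Char)) (pfx : List Char) : Option Int :=
  match tokens.reverse.find? (fun t => PySem.Chars.startswith t pfx) with
  | some t => pvBParseId t
  | none => none

def parse_recall_scope_py_alt (scope : Option String) : String × Option Int × Option Int :=
  let base : List Char :=
    match scope with
    | none => "auto".toList
    | some s => if s.toList = [] then "auto".toList else s.toList
  let tokens := PySem.Chars.split₀ (PySem.Chars.lower (PySem.Chars.strip base))
  (String.ofList (pvBLastTemporal tokens),
   pvBLastId tokens "guild:".toList,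
   pvBLastId tokens "channel:".toList)

-- ===== PRECONDITION & SPEC =====
def Spec_parse_recall_scope_py (scope : Option String) (out : String × Option Int × Option Int) : Prop := out = parse_recall_scope_py_alt scope
instance (scope : Option String) (out : String × Option Int × Option Int) : Decidable (Spec_parse_recall_scope_py scope out) := by unfold Spec_parse_recall_scope_py; infer_instance

-- ===== CLAIM (what is proved, stated in full; the proofs are below) =====
def Claim_equal_parse_recall_scope_py : Prop := ∀ (scope : Option String), Dom_parse_recall_scope_py scope → Spec_parse_recall_scope_py scope (parse_recall_scope_py scope)

-- ===== LEMMAS AND PROOFS =====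

-- classification facts: the three branch guards of A are mutually exclusive
lemma temp_not_chan (t : List Char)
    (h : (["hot".toList, "warm".toList, "cold".toList, "auto".toList]).contains t = true) :
    PySem.Chars.startswith t "channel:".toList = false := by
  simp at h
  rcases h with h | h | h | h <;> subst h <;> decide

lemma temp_not_guild (t : List Char)
    (h : (["hot".toList, "warm".toList, "cold".toList, "auto".toList]).contains t = true) :
    PySem.Chars.startswith t "guild:".toList = false := by
  simp at h
  rcases h with h | h | h | h <;> subst h <;> decide

lemma chan_not_guild (t : List Char) (h : PySem.Chars.startswith t "channel:".toList = true) :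
    PySem.Chars.startswith t "guild:".toList = false := by
  rw [PySem.Chars.startswith_iff] at h
  by_contra hg
  rw [Bool.not_eq_false, PySem.Chars.startswith_iff] at hg
  obtain ⟨r1, h1⟩ := h
  obtain ⟨r2, h2⟩ := hg
  rw [← h1] at h2
  simp at h2

-- each component of one A-step depends only on its own guard
lemma aStep_fst (st : List Char × Option Int × Option Int) (tok : List Char) :
    (pvAStep st tok).1 =
      if (["hot".toList, "warm".toList, "cold".toList, "auto".toList]).contains tok
      then tok else st.1 := by
  unfold pvAStep; split_ifs <;> rfl

lemma aStep_guild (st : List Char × Option Int × Option Int) (tok : List Char) :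
    (pvAStep st tok).2.1 =
      if PySem.Chars.startswith tok "guild:".toList then pvAParseId tok else st.2.1 := by
  unfold pvAStep
  by_cases h1 : (["hot".toList, "warm".toList, "cold".toList, "auto".toList]).contains tok = true
  · rw [if_pos h1, temp_not_guild tok h1]; simp
  · rw [if_neg h1]
    by_cases h2 : PySem.Chars.startswith tok "channel:".toList = true
    · rw [if_pos h2, chan_not_guild tok h2]; simp
    · rw [if_neg h2]
      by_cases h3 : PySem.Chars.startswith tok "guild:".toList = true
      · rw [if_pos h3, if_pos h3]
      · rw [if_neg h3, if_neg h3]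

lemma aStep_chan (st : List Char × Option Int × Option Int) (tok : List Char) :
    (pvAStep st tok).2.2 =
      if PySem.Chars.startswith tok "channel:".toList then pvAParseId tok else st.2.2 := by
  unfold pvAStep
  by_cases h1 : (["hot".toList, "warm".toList, "cold".toList, "auto".toList]).contains tok = true
  · rw [if_pos h1, temp_not_chan tok h1]; simp
  · rw [if_neg h1]
    by_cases h2 : PySem.Chars.startswith tok "channel:".toList = true
    · rw [if_pos h2, if_pos h2]
    · rw [if_neg h2, if_neg h2]
      by_cases h3 : PySem.Chars.startswith tok "guild:".toList = true
      · rw [if_pos h3]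
      · rw [if_neg h3]

-- pushing the appended last token into the default of a last-match scan
lemma pick_or_getD (p : List Char → Bool) (l : List (List Char)) (tok d : List Char) :
    ((List.find? p l).or (List.find? p [tok])).getD d =
      (List.find? p l).getD (if p tok then tok else d) := by
  cases List.find? p l <;> cases h : p tok <;> simp [List.find?, Option.or, h]

lemma pick_or_id (p : List Char → Bool) (l : List (List Char)) (tok : List Char) (d : Option Int) :
    (match (List.find? p l).or (List.find? p [tok]) with
      | some t => pvAParseId t | none => d) =
    (match List.find? p l with
      | some t => pvAParseId t | none => if p tok then pvAParseId tok else d) := by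
  cases List.find? p l <;> cases h : p tok <;> simp [List.find?, Option.or, h]

-- A's fold computes, in each component, the last matching token of its own guard
lemma aLoop_eq (toks : List (List Char)) (st : List Char × Option Int × Option Int) :
    toks.foldl pvAStep st =
      ((toks.reverse.find? (fun t =>
          (["hot".toList, "warm".toList, "cold".toList, "auto".toList]).contains t)).getD st.1,
       (match toks.reverse.find? (fun t => PySem.Chars.startswith t "guild:".toList) with
        | some t => pvAParseId t
        | none => st.2.1),
       (match toks.reverse.find? (fun t => PySem.Chars.startswith t "channel:".toList) with
        | some t => pvAParseId t
        | none => st.2.2)) := by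
  induction toks generalizing st with
  | nil => simp
  | cons tok toks ih =>
    rw [List.foldl_cons, ih, List.reverse_cons]
    simp only [List.find?_append, pick_or_getD, pick_or_id]
    rw [← aStep_fst, ← aStep_guild, ← aStep_chan]

-- ===== VERDICT (by name: the statement is the Claim_ definition above) =====
theorem parse_recall_scope_py_spec : Claim_equal_parse_recall_scope_py := by
  intro scope _
  unfold Spec_parse_recall_scope_py parse_recall_scope_py parse_recall_scope_py_alt
  simp only [aLoop_eq]
  rfl
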